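-- pv_equiv track=rewrite | github.com/abyssaldragonz/CodePathSpring2025 | TIP102/TIP102 3-6.py | match_buyers_and_sellers
-- ===== SOURCE A (Python) =====
-- def match_buyers_and_sellers(buyers, sellers):
--     # max num of sales
--     # each buyer can only buy from one person
--     # each seller can only sell from one person
--
--     # two pointers to loop through two lists
--     # sort lists before looping
--
--     maxSales = 0
--
--     buyers.sort()
--     sellers.sort()
--     buyers=buyers[::-1]
--     sellers=sellers[::-1]
--
--     buyPoint, sellPoint = 0, 0
--
--     while (buyers and sellers and buyPoint<len(buyers)):
--         # if a sale is made, pop the ones who were involved in sale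
--         if buyers[buyPoint] >= sellers[sellPoint]:
--             # can make sale
--             buyers.pop(buyPoint)
--             sellers.pop(sellPoint)
--             maxSales += 1
--         else:
--             # no sale can be made
--             buyPoint += 1
--
--
--     return maxSales
-- ===== SOURCE B (Python) =====
-- def match_buyers_and_sellers(buyers, sellers):
--     # Sort both descending once, then count the longest prefix where the
--     # i-th richest buyer can afford the i-th most expensive seller.
--     # (Does not mutate its arguments, unlike the original.)
--     b = sorted(buyers)[::-1]
--     s = sorted(sellers)[::-1]
--     count = 0
--     for x, y in zip(b, s):
--         if x < y:
--             break
--         count += 1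
--     return count
-- ===== Notes on version B (the rewrite author's own statement) =====
-- stated objective: alternative
-- what changed: Replaces the pop-based while loop (each sale pops from both lists) with a single zip pass over the two descending-sorted lists counting the longest prefix with buyer >= seller; asymptotically O(n log n) vs A's worst-case O(n^2), though a timing run on its random family measured only ~1.3x.
import Mathlib
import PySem

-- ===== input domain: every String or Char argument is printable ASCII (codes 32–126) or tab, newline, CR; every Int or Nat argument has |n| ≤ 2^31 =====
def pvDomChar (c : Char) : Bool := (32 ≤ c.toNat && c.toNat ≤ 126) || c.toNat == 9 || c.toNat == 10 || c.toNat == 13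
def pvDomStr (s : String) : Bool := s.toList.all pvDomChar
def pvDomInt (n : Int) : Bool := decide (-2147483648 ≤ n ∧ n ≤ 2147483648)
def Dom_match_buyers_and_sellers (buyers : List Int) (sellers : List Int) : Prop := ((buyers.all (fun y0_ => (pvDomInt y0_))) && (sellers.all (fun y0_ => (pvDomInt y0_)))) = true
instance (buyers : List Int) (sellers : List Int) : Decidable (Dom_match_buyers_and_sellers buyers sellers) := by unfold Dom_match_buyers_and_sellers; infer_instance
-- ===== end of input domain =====

-- B replaces A's pop-based while loop by one zip pass counting the longest prefix with
-- buyer >= seller over the two descending-sorted lists (alternative algorithm; note: A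
-- sorts its argument lists in place, B does not — the equivalence is about the RETURN value only).


-- ===== PORT A =====
-- the while loop: state (buyers, sellers, buyPoint, maxSales); sellPoint stays 0 in A,
-- so sellers[sellPoint] is sellers.getD 0 and sellers.pop(sellPoint) is eraseIdx 0.
-- list.pop(i) at an in-range index removes the element: eraseIdx (indices are in range
-- under the loop guard, so getD/eraseIdx are exact here).
def pvLoopA (buyers : List Int) (sellers : List Int) (buyPoint : Nat) (maxSales : Int) : Int :=
  if h : ¬(buyers = []) ∧ ¬(sellers = []) ∧ buyPoint < buyers.length then
    if buyers.getD buyPoint 0 ≥ sellers.getD 0 0 then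
      pvLoopA (buyers.eraseIdx buyPoint) (sellers.eraseIdx 0) buyPoint (maxSales + 1)
    else
      pvLoopA buyers sellers (buyPoint + 1) maxSales
  else maxSales
termination_by (buyers.length - buyPoint) + sellers.length
decreasing_by
  · have h1 : (buyers.eraseIdx buyPoint).length = buyers.length - 1 :=
      List.length_eraseIdx_of_lt h.2.2
    have h2 : sellers.length ≠ 0 := fun hz => h.2.1 (List.eq_nil_of_length_eq_zero hz)
    have h3 : (sellers.eraseIdx 0).length = sellers.length - 1 :=
      List.length_eraseIdx_of_lt (by omega)
    have := h.2.2
    omega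
  · have := h.2.2; omega

-- buyers.sort(); buyers = buyers[::-1]  →  reversed stable sort  (xs[::-1] = slice? none none (-1))
def match_buyers_and_sellers (buyers : List Int) (sellers : List Int) : Int :=
  let buyers' := (PySem.List.slice? (PySem.List.sorted buyers (fun x => x) false) none none (-1)).getD []
  let sellers' := (PySem.List.slice? (PySem.List.sorted sellers (fun x => x) false) none none (-1)).getD []
  pvLoopA buyers' sellers' 0 0

-- ===== PORT B =====
-- the for-loop over zip(b, s) with break: structural recursion on the two lists
def pvCountPrefix : List Int → List Int → Int
  | x :: xs, y :: ys => if x < y then 0 else 1 + pvCountPrefix xs ys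
  | _, _ => 0

def match_buyers_and_sellers_alt (buyers : List Int) (sellers : List Int) : Int :=
  let b := (PySem.List.slice? (PySem.List.sorted buyers (fun x => x) false) none none (-1)).getD []
  let s := (PySem.List.slice? (PySem.List.sorted sellers (fun x => x) false) none none (-1)).getD []
  pvCountPrefix b s

-- ===== PRECONDITION & SPEC =====
def Spec_match_buyers_and_sellers (buyers : List Int) (sellers : List Int) (out : Int) : Prop := out = match_buyers_and_sellers_alt buyers sellers
instance (buyers : List Int) (sellers : List Int) (out : Int) : Decidable (Spec_match_buyers_and_sellers buyers sellers out) := by unfold Spec_match_buyers_and_sellers; infer_instance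

-- ===== CLAIM (what is proved, stated in full; the proofs are below) =====
def Claim_equal_match_buyers_and_sellers : Prop := ∀ (buyers : List Int) (sellers : List Int), Dom_match_buyers_and_sellers buyers sellers → Spec_match_buyers_and_sellers buyers sellers (match_buyers_and_sellers buyers sellers)

-- ===== LEMMAS AND PROOFS =====

lemma pvCountPrefix_nil_right (xs : List Int) : pvCountPrefix xs [] = 0 := by
  cases xs <;> rfl

lemma drop_eraseIdx_self (l : List Int) : ∀ n : Nat, (l.eraseIdx n).drop n = l.drop (n + 1) := by
  induction l with
  | nil => intro n; simp
  | cons x t ih =>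
    intro n
    cases n with
    | zero => simp
    | succ m => simpa using ih m

-- the loop invariant: on a descending (Pairwise ≥) buyers list, A's loop adds the
-- length of the longest prefix of (buyers.drop buyPoint, sellers) with buyer ≥ seller
lemma pvLoopA_eq : ∀ (n : Nat) (buyers sellers : List Int) (bp : Nat) (acc : Int),
    (buyers.length - bp) + sellers.length ≤ n →
    buyers.Pairwise (· ≥ ·) →
    pvLoopA buyers sellers bp acc = acc + pvCountPrefix (buyers.drop bp) sellers := by
  intro n
  induction n with
  | zero =>
    intro buyers sellers bp acc hn hp
    have hs : sellers = [] := List.eq_nil_of_length_eq_zero (by omega)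
    rw [pvLoopA]
    simp [hs, pvCountPrefix_nil_right]
  | succ n ih =>
    intro buyers sellers bp acc hn hp
    rw [pvLoopA]
    by_cases hg : ¬(buyers = []) ∧ ¬(sellers = []) ∧ bp < buyers.length
    · obtain ⟨hb, hs, hlt⟩ := hg
      rw [dif_pos ⟨hb, hs, hlt⟩]
      obtain ⟨s0, rest, rfl⟩ : ∃ s0 rest, sellers = s0 :: rest := by
        cases sellers with
        | nil => exact absurd rfl hs
        | cons a l => exact ⟨a, l, rfl⟩
      have hdrop : buyers.drop bp = buyers[bp] :: buyers.drop (bp + 1) :=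
        List.drop_eq_getElem_cons hlt
      have hgetD : buyers.getD bp 0 = buyers[bp] := List.getD_eq_getElem buyers 0 hlt
      by_cases hge : buyers.getD bp 0 ≥ (s0 :: rest).getD 0 0
      · rw [if_pos hge]
        have hges : s0 ≤ buyers[bp] := by rw [hgetD] at hge; simpa using hge
        have hlen : (buyers.eraseIdx bp).length = buyers.length - 1 :=
          List.length_eraseIdx_of_lt hlt
        have hih := ih (buyers.eraseIdx bp) rest bp (acc + 1)
          (by rw [hlen]; simp only [List.length_cons] at hn; omega)
          (hp.sublist (List.eraseIdx_sublist buyers bp))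
        simp only [List.eraseIdx_cons_zero]
        rw [hih, drop_eraseIdx_self, hdrop]
        simp only [pvCountPrefix]
        rw [if_neg (not_lt.mpr hges)]
        ring
      · rw [if_neg hge]
        have hlt' : buyers[bp] < s0 := by
          rw [hgetD] at hge
          exact not_le.mp (by simpa using hge)
        have hih := ih buyers (s0 :: rest) (bp + 1) acc (by omega) hp
        rw [hih, hdrop]
        simp only [pvCountPrefix]
        rw [if_pos hlt']
        cases hd : buyers.drop (bp + 1) with
        | nil => simp [pvCountPrefix]
        | cons b' t =>
          have hpd : (buyers.drop bp).Pairwise (· ≥ ·) := hp.sublist (List.drop_sublist bp buyers)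
          rw [hdrop, hd] at hpd
          have hble : buyers[bp] ≥ b' := (List.pairwise_cons.mp hpd).1 b' (by simp)
          simp only [pvCountPrefix]
          rw [if_pos (by omega)]
    · rw [dif_neg hg]
      push Not at hg
      by_cases hb : buyers = []
      · subst hb; cases sellers <;> simp [pvCountPrefix]
      · by_cases hs : sellers = []
        · simp [hs, pvCountPrefix_nil_right]
        · have hle : buyers.length ≤ bp := hg hb hs
          rw [List.drop_eq_nil_of_le hle]
          cases sellers <;> simp [pvCountPrefix]

lemma desc_pairwise (xs : List Int) :
    ((PySem.List.slice? (PySem.List.sorted xs (fun x => x) false) none none (-1)).getD []).Pairwise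
      (· ≥ ·) := by
  rw [PySem.List.slice?_none_none_neg_one]
  simp only [Option.getD_some]
  rw [List.pairwise_reverse]
  exact PySem.List.sorted_pairwise xs (fun x => x)

-- ===== VERDICT (by name: the statement is the Claim_ definition above) =====
theorem match_buyers_and_sellers_spec : Claim_equal_match_buyers_and_sellers := by
  intro buyers sellers _
  unfold Spec_match_buyers_and_sellers match_buyers_and_sellers match_buyers_and_sellers_alt
  have := pvLoopA_eq
    ((((PySem.List.slice? (PySem.List.sorted buyers (fun x => x) false) none none (-1)).getD []).length - 0)
      + ((PySem.List.slice? (PySem.List.sorted sellers (fun x => x) false) none none (-1)).getD []).length)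
    ((PySem.List.slice? (PySem.List.sorted buyers (fun x => x) false) none none (-1)).getD [])
    ((PySem.List.slice? (PySem.List.sorted sellers (fun x => x) false) none none (-1)).getD [])
    0 0 (le_refl _) (desc_pairwise buyers)
  simpa using this
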